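-- pv_equiv track=rewrite | github.com/Ericwang6/easybfe | easybfe/amber/prep.py | mk_renumber_mapping_from_cc
-- ===== SOURCE A (Python) =====
-- from typing import Union, Dict, List, Tuple, Any
--
-- def mk_renumber_mapping_from_cc(cc_list: List[int], natoms: int):
--     sc_offset = len(cc_list)
--     cc_offset = 0
--     mapping = {}
--     for i in range(natoms):
--         if i in cc_list:
--             mapping[i] = cc_offset
--             cc_offset += 1
--         else:
--             mapping[i] = sc_offset
--             sc_offset += 1
--     return mapping
-- ===== SOURCE B (Python) =====
-- def mk_renumber_mapping_from_cc(cc_list, natoms):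
--     # Partition atoms into common-core and side-chain, rank each group
--     # separately, then emit the mapping in atom-index order.
--     cc_set = set(cc_list)
--     cc_atoms = [i for i in range(natoms) if i in cc_set]
--     sc_atoms = [i for i in range(natoms) if i not in cc_set]
--     new_index = {old: new for new, old in enumerate(cc_atoms)}
--     new_index.update((old, len(cc_list) + k) for k, old in enumerate(sc_atoms))
--     return {i: new_index[i] for i in range(natoms)}
-- ===== Notes on version B (the rewrite author's own statement) =====
-- stated objective: alternative
-- what changed: A numbers atoms in one pass keeping two running counters and scanning cc_list for membership at every atom; B first partitions the index range into core and side-chain atom lists, ranks each partition separately with enumerate into a lookup table, then emits the mapping in a final pass over the atom indices.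
import Mathlib
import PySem

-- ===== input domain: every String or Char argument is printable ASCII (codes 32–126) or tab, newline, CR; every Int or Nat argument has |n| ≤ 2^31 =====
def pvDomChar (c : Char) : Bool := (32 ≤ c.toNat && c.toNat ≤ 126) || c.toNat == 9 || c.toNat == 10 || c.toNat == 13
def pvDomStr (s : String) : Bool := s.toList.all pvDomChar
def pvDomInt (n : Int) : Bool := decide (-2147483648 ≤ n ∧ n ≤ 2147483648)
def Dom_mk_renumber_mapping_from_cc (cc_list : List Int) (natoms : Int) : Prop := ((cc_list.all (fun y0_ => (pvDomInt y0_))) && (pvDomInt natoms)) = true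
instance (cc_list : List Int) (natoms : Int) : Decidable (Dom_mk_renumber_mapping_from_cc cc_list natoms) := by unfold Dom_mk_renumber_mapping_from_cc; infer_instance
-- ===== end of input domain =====

-- B splits the work into partition + two ranking passes + an emit pass (simpler decomposition,
-- and set membership instead of a list scan per atom); equal return value proved on the domain.


-- ===== PORT A =====
def mk_renumber_mapping_from_cc (cc_list : List Int) (natoms : Int) : List (Int × Int) :=
  -- state (sc_offset, cc_offset, mapping)
  (((PySem.List.pyRange 0 natoms 1).foldl
    (fun st i =>
      if cc_list.contains i then (st.1, st.2.1 + 1, st.2.2.insert i st.2.1)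
      else (st.1 + 1, st.2.1, st.2.2.insert i st.1))
    ((cc_list.length : Int), (0 : Int), (PySem.Dict.empty : PySem.Dict Int Int))).2.2).items

-- ===== PORT B =====
def mk_renumber_mapping_from_cc_alt (cc_list : List Int) (natoms : Int) : List (Int × Int) :=
  let cc_set : PySem.Set Int := PySem.Set.ofList cc_list
  let cc_atoms := (PySem.List.pyRange 0 natoms 1).filter (fun i => PySem.Set.contains cc_set i)
  let sc_atoms := (PySem.List.pyRange 0 natoms 1).filter (fun i => !(PySem.Set.contains cc_set i))
  let new_index0 := (PySem.List.enumerate cc_atoms 0).foldl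
    (fun d p => d.insert p.2 p.1) (PySem.Dict.empty : PySem.Dict Int Int)
  let new_index := (PySem.List.enumerate sc_atoms 0).foldl
    (fun d p => d.insert p.2 ((cc_list.length : Int) + p.1)) new_index0
  -- new_index[i]: a KeyError is impossible (every 0 ≤ i < natoms is in exactly one partition), so getD is exact here
  ((PySem.List.pyRange 0 natoms 1).foldl
    (fun d i => d.insert i (new_index.getD i 0)) (PySem.Dict.empty : PySem.Dict Int Int)).items

-- ===== PRECONDITION & SPEC =====
def Spec_mk_renumber_mapping_from_cc (cc_list : List Int) (natoms : Int) (out : List (Int × Int)) : Prop := out = mk_renumber_mapping_from_cc_alt cc_list natoms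
instance (cc_list : List Int) (natoms : Int) (out : List (Int × Int)) : Decidable (Spec_mk_renumber_mapping_from_cc cc_list natoms out) := by unfold Spec_mk_renumber_mapping_from_cc; infer_instance

-- ===== CLAIM (what is proved, stated in full; the proofs are below) =====
def Claim_equal_mk_renumber_mapping_from_cc : Prop := ∀ (cc_list : List Int) (natoms : Int), Dom_mk_renumber_mapping_from_cc cc_list natoms → Spec_mk_renumber_mapping_from_cc cc_list natoms (mk_renumber_mapping_from_cc cc_list natoms)

-- ===== LEMMAS AND PROOFS =====

-- reference description of A's loop output (items list), recursing over the index list with the two counters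
def refMap (cc : List Int) : List Int → Int → Int → List (Int × Int)
  | [], _, _ => []
  | i :: L, sc, cco =>
    if cc.contains i then (i, cco) :: refMap cc L sc (cco + 1)
    else (i, sc) :: refMap cc L (sc + 1) cco

theorem A_fold_items (cc : List Int) (L : List Int) (sc cco : Int) (d : PySem.Dict Int Int)
    (hfresh : ∀ i ∈ L, d.contains i = false) (hnd : L.Nodup) :
    ((L.foldl
      (fun st i =>
        if cc.contains i then (st.1, st.2.1 + 1, st.2.2.insert i st.2.1)
        else (st.1 + 1, st.2.1, st.2.2.insert i st.1))
      (sc, cco, d)).2.2).items = d.items ++ refMap cc L sc cco := by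
  induction L generalizing sc cco d with
  | nil => simp [refMap]
  | cons i L ih =>
    have hdi : d.contains i = false := hfresh i List.mem_cons_self
    have hfresh' : ∀ v, ∀ j ∈ L, (d.insert i v).contains j = false := by
      intro v j hj
      have hji : j ≠ i := fun h => (List.nodup_cons.mp hnd).1 (h ▸ hj)
      rw [PySem.Dict.contains_insert]
      simp [hji, hfresh j (List.mem_cons_of_mem _ hj)]
    have hnd' : L.Nodup := (List.nodup_cons.mp hnd).2
    by_cases hc : cc.contains i = true
    · simp only [List.foldl_cons, hc, refMap, reduceIte]
      rw [ih sc (cco + 1) (d.insert i cco) (hfresh' cco) hnd',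
        PySem.Dict.items_insert_of_not_contains _ _ hdi]
      simp
    · simp only [List.foldl_cons, refMap, hc, Bool.false_eq_true, reduceIte]
      rw [ih (sc + 1) cco (d.insert i sc) (hfresh' sc) hnd',
        PySem.Dict.items_insert_of_not_contains _ _ hdi]
      simp

-- number of common-core / side-chain atoms with index below i
def nCC (cc : List Int) (i : Int) : Int :=
  (((PySem.List.pyRange 0 i 1).filter (fun j => cc.contains j)).length : Int)
def nSC (cc : List Int) (i : Int) : Int :=
  (((PySem.List.pyRange 0 i 1).filter (fun j => !cc.contains j)).length : Int)

theorem set_contains_ofList (cc : List Int) (i : Int) :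
    (PySem.Set.ofList cc).contains i = cc.contains i := by
  by_cases h : i ∈ cc <;>
    simp [PySem.Set.contains, PySem.Set.mem_ofList, h]

theorem nCC_succ (cc : List Int) (a : Int) (h : 0 ≤ a) :
    nCC cc (a + 1) = nCC cc a + (if cc.contains a then 1 else 0) := by
  unfold nCC
  rw [PySem.List.pyRange_one_succ_right h, List.filter_append]
  by_cases hc : cc.contains a = true <;> simp_all

theorem nSC_succ (cc : List Int) (a : Int) (h : 0 ≤ a) :
    nSC cc (a + 1) = nSC cc a + (if cc.contains a then 0 else 1) := by
  unfold nSC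
  rw [PySem.List.pyRange_one_succ_right h, List.filter_append]
  by_cases hc : cc.contains a = true <;> simp_all

-- refMap over a tail range, with the counters set from the prefix counts, is pointwise the closed form
theorem refMap_eq_map (cc : List Int) (n : Int) (k : Nat) :
    ∀ a : Int, 0 ≤ a → (n - a).toNat = k →
    refMap cc (PySem.List.pyRange a n 1) ((cc.length : Int) + nSC cc a) (nCC cc a) =
      (PySem.List.pyRange a n 1).map
        (fun i => (i, if cc.contains i then nCC cc i else (cc.length : Int) + nSC cc i)) := by
  induction k with
  | zero =>
    intro a _ hk
    have : n ≤ a := by omega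
    simp [PySem.List.pyRange_one_eq_nil this, refMap]
  | succ k ih =>
    intro a ha hk
    have hlt : a < n := by omega
    rw [PySem.List.pyRange_one_cons hlt]
    have ih' := ih (a + 1) (by omega) (by omega)
    by_cases hc : cc.contains a = true
    · simp only [refMap, hc, reduceIte, List.map_cons]
      have h1 : nCC cc (a + 1) = nCC cc a + 1 := by rw [nCC_succ cc a ha]; simp_all
      have h2 : nSC cc (a + 1) = nSC cc a := by rw [nSC_succ cc a ha]; simp_all
      rw [← h1, ← h2, ih']
    · simp only [refMap, hc, Bool.false_eq_true, reduceIte, List.map_cons]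
      have h1 : nCC cc (a + 1) = nCC cc a := by rw [nCC_succ cc a ha]; simp_all
      have h2 : nSC cc (a + 1) = nSC cc a + 1 := by rw [nSC_succ cc a ha]; simp_all
      have : (cc.length : Int) + nSC cc a + 1 = (cc.length : Int) + nSC cc (a + 1) := by omega
      rw [this, ← h1, ih']

-- splitting a filtered range at a member whose predicate holds
theorem filter_range_split (p : Int → Bool) (i n : Int) (h0 : 0 ≤ i) (hn : i < n) (hp : p i = true) :
    (PySem.List.pyRange 0 n 1).filter p =
      (PySem.List.pyRange 0 i 1).filter p ++ i :: (PySem.List.pyRange (i + 1) n 1).filter p := by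
  rw [PySem.List.pyRange_one_append 0 i n h0 (le_of_lt hn), List.filter_append,
    PySem.List.pyRange_one_cons hn]
  simp [hp]

-- proof-side names for B's intermediate values (with the set-membership test rewritten to list membership)
def ccAtomsH (cc : List Int) (n : Int) : List Int :=
  (PySem.List.pyRange 0 n 1).filter (fun i => cc.contains i)
def scAtomsH (cc : List Int) (n : Int) : List Int :=
  (PySem.List.pyRange 0 n 1).filter (fun i => !cc.contains i)
def newIndexH (cc : List Int) (n : Int) : PySem.Dict Int Int :=
  (PySem.List.enumerate (scAtomsH cc n) 0).foldl
    (fun d p => d.insert p.2 ((cc.length : Int) + p.1))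
    ((PySem.List.enumerate (ccAtomsH cc n) 0).foldl
      (fun d p => d.insert p.2 p.1) PySem.Dict.empty)

theorem alt_eq (cc : List Int) (n : Int) :
    mk_renumber_mapping_from_cc_alt cc n =
      ((PySem.List.pyRange 0 n 1).foldl
        (fun d i => d.insert i ((newIndexH cc n).getD i 0)) PySem.Dict.empty).items := by
  simp only [mk_renumber_mapping_from_cc_alt, newIndexH, ccAtomsH, scAtomsH, set_contains_ofList]

theorem nodup_ccAtomsH (cc : List Int) (n : Int) : (ccAtomsH cc n).Nodup :=
  (PySem.List.nodup_pyRange_one 0 n).filter _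

theorem nodup_scAtomsH (cc : List Int) (n : Int) : (scAtomsH cc n).Nodup :=
  (PySem.List.nodup_pyRange_one 0 n).filter _

theorem disj_atomsH (cc : List Int) (n : Int) :
    ∀ i ∈ scAtomsH cc n, i ∉ ccAtomsH cc n := by
  intro i hi h
  unfold scAtomsH at hi
  unfold ccAtomsH at h
  simp at hi h
  exact hi.2 h.2

theorem newIndexH_items (cc : List Int) (n : Int) :
    (newIndexH cc n).items =
      (PySem.List.enumerate (ccAtomsH cc n) 0).map (fun p => (p.2, p.1)) ++
      (PySem.List.enumerate (scAtomsH cc n) 0).map (fun p => (p.2, (cc.length : Int) + p.1)) := by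
  unfold newIndexH
  have h1 : ((PySem.List.enumerate (ccAtomsH cc n) 0).foldl
      (fun d p => d.insert p.2 p.1) (PySem.Dict.empty : PySem.Dict Int Int)).items =
      (PySem.List.enumerate (ccAtomsH cc n) 0).map (fun p => (p.2, p.1)) :=
    PySem.Dict.items_foldl_insert_fresh (PySem.List.enumerate (ccAtomsH cc n) 0)
      (fun p => p.2) (fun p => p.1) PySem.Dict.empty
      (by simp [PySem.Dict.contains_empty])
      (by rw [PySem.List.map_snd_enumerate]; exact nodup_ccAtomsH cc n)
  have hkeys : (((PySem.List.enumerate (ccAtomsH cc n) 0).foldl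
      (fun d p => d.insert p.2 p.1) (PySem.Dict.empty : PySem.Dict Int Int))).keys =
      ccAtomsH cc n := by
    simp only [PySem.Dict.keys]
    rw [h1, List.map_map]
    simp [Function.comp_def, PySem.List.map_snd_enumerate]
  have hfresh2 : ∀ p ∈ PySem.List.enumerate (scAtomsH cc n) 0,
      (((PySem.List.enumerate (ccAtomsH cc n) 0).foldl
        (fun d p => d.insert p.2 p.1) (PySem.Dict.empty : PySem.Dict Int Int))).contains p.2 = false := by
    intro p hp
    have hmem : p.2 ∈ scAtomsH cc n := by
      have := PySem.List.map_snd_enumerate (scAtomsH cc n) 0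
      rw [← this]; exact List.mem_map_of_mem hp
    rw [PySem.Dict.contains_eq_decide_mem_keys, hkeys]
    simpa using disj_atomsH cc n p.2 hmem
  have h2 := PySem.Dict.items_foldl_insert_fresh (PySem.List.enumerate (scAtomsH cc n) 0)
      (fun p => p.2) (fun p => (cc.length : Int) + p.1) _ hfresh2
      (by rw [PySem.List.map_snd_enumerate]; exact nodup_scAtomsH cc n)
  rw [h2, h1]

theorem keys_newIndexH (cc : List Int) (n : Int) :
    (newIndexH cc n).keys = ccAtomsH cc n ++ scAtomsH cc n := by
  simp only [PySem.Dict.keys]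
  rw [newIndexH_items, List.map_append, List.map_map, List.map_map]
  simp [Function.comp_def, PySem.List.map_snd_enumerate]

theorem nodup_keys_newIndexH (cc : List Int) (n : Int) : (newIndexH cc n).keys.Nodup := by
  rw [keys_newIndexH]
  exact List.Nodup.append (nodup_ccAtomsH cc n) (nodup_scAtomsH cc n)
    (fun i hc hs => disj_atomsH cc n i hs hc)

theorem getD_newIndexH (cc : List Int) (n i : Int) (h0 : 0 ≤ i) (hn : i < n) :
    (newIndexH cc n).getD i 0 =
      if cc.contains i then nCC cc i else (cc.length : Int) + nSC cc i := by
  by_cases hc : cc.contains i = true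
  · have hsplit := filter_range_split (fun j => cc.contains j) i n h0 hn hc
    have hpair : ((nCC cc i : Int), i) ∈ PySem.List.enumerate (ccAtomsH cc n) 0 := by
      unfold ccAtomsH
      rw [hsplit, PySem.List.enumerate_append, PySem.List.enumerate_cons]
      refine List.mem_append_right _ ?_
      have : ((nCC cc i : Int), i) =
          ((0 : Int) + ↑((PySem.List.pyRange 0 i 1).filter (fun j => cc.contains j)).length, i) := by
        simp [nCC]
      rw [this]
      exact List.mem_cons_self
    have hmem : (i, (nCC cc i : Int)) ∈ (newIndexH cc n).items := by
      rw [newIndexH_items]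
      exact List.mem_append_left _ (List.mem_map_of_mem hpair)
    rw [PySem.Dict.getD_of_mem_items _ hmem (nodup_keys_newIndexH cc n)]
    rw [if_pos hc]
  · have hcf : cc.contains i = false := eq_false_of_ne_true hc
    have hc' : (!cc.contains i) = true := by rw [hcf]; rfl
    have hsplit := filter_range_split (fun j => !cc.contains j) i n h0 hn hc'
    have hpair : ((nSC cc i : Int), i) ∈ PySem.List.enumerate (scAtomsH cc n) 0 := by
      unfold scAtomsH
      rw [hsplit, PySem.List.enumerate_append, PySem.List.enumerate_cons]
      refine List.mem_append_right _ ?_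
      have : ((nSC cc i : Int), i) =
          ((0 : Int) + ↑((PySem.List.pyRange 0 i 1).filter (fun j => !cc.contains j)).length, i) := by
        simp [nSC]
      rw [this]
      exact List.mem_cons_self
    have hmem : (i, (cc.length : Int) + nSC cc i) ∈ (newIndexH cc n).items := by
      rw [newIndexH_items]
      exact List.mem_append_right _ (List.mem_map_of_mem hpair)
    rw [PySem.Dict.getD_of_mem_items _ hmem (nodup_keys_newIndexH cc n)]
    rw [if_neg hc]

theorem nCC_zero (cc : List Int) : nCC cc 0 = 0 := by
  simp [nCC, PySem.List.pyRange_one_eq_nil (le_refl (0 : Int))]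

theorem nSC_zero (cc : List Int) : nSC cc 0 = 0 := by
  simp [nSC, PySem.List.pyRange_one_eq_nil (le_refl (0 : Int))]

-- ===== VERDICT (by name: the statement is the Claim_ definition above) =====
theorem mk_renumber_mapping_from_cc_spec : Claim_equal_mk_renumber_mapping_from_cc := by
  intro cc n _
  unfold Spec_mk_renumber_mapping_from_cc
  -- A's side: the loop builds exactly refMap
  unfold mk_renumber_mapping_from_cc
  rw [A_fold_items cc (PySem.List.pyRange 0 n 1) (cc.length : Int) 0 PySem.Dict.empty
      (by simp [PySem.Dict.contains_empty]) (PySem.List.nodup_pyRange_one 0 n)]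
  have href := refMap_eq_map cc n (n - 0).toNat 0 (le_refl 0) rfl
  rw [nSC_zero, nCC_zero, add_zero] at href
  have hempty : (PySem.Dict.empty : PySem.Dict Int Int).items = [] := rfl
  rw [hempty, List.nil_append, href]
  -- B's side: the emit pass lists exactly the ranks stored in new_index
  have hB : mk_renumber_mapping_from_cc_alt cc n =
      (PySem.List.pyRange 0 n 1).map (fun i => (i, (newIndexH cc n).getD i 0)) := by
    rw [alt_eq]
    have := PySem.Dict.items_foldl_insert_fresh (PySem.List.pyRange 0 n 1)
      (fun i => i) (fun i => (newIndexH cc n).getD i 0)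
      PySem.Dict.empty (by simp [PySem.Dict.contains_empty])
      (by simpa using PySem.List.nodup_pyRange_one 0 n)
    rw [this, hempty, List.nil_append]
  rw [hB]
  apply List.map_congr_left
  intro i hi
  rw [PySem.List.mem_pyRange_one] at hi
  rw [getD_newIndexH cc n i hi.1 hi.2]
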